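-- pv_equiv track=rewrite | github.com/placerte/simple-document | src/simdoc/_text.py | select_code_fence
-- ===== SOURCE A (Python) =====
-- def select_code_fence(text: str) -> str:
--     longest = 0
--     current = 0
--     for ch in text:
--         if ch == "`":
--             current += 1
--             if current > longest:
--                 longest = current
--         else:
--             current = 0
--     fence_len = max(3, longest + 1)
--     return "`" * fence_len
-- ===== SOURCE B (Python) =====
-- def select_code_fence(text: str) -> str:
--     # Probe candidate fences of increasing length, starting at the minimum 3,
--     # until one is not a substring of the text.
--     n = 3
--     while "`" * n in text:
--         n += 1
--     return "`" * n
-- ===== Notes on version B (the rewrite author's own statement) =====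
-- stated objective: idiomatic
-- what changed: B never scans characters or computes run lengths: it probes candidate fences of increasing length with substring-membership tests ('`'*n in text) until one is absent, instead of A's character scan maintaining a running counter and running maximum.
import Mathlib
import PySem

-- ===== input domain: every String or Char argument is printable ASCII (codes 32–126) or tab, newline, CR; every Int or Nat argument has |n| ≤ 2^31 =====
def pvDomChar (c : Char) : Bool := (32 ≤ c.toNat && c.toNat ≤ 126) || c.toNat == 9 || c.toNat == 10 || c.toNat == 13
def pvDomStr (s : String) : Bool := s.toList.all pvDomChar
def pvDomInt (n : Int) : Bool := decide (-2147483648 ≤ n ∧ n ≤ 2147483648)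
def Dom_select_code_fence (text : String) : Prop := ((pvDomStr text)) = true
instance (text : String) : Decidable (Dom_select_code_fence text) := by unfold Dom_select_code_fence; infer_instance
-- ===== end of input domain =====

-- B probes candidate fences of increasing length with substring-membership tests instead of
-- A's character scan with a running counter (objective: idiomatic; not claimed faster).

-- ===== PORT A =====
-- A's loop: state (longest, current), one step per character.
def select_code_fence (text : String) : String :=
  let st := text.toList.foldl
    (fun (p : Nat × Nat) ch =>
      if ch = '`' then
        let current := p.2 + 1
        let longest := if current > p.1 then current else p.1
        (longest, current)
      else (p.1, 0)) (0, 0)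
  let fence_len := max 3 (st.1 + 1)
  String.ofList (List.replicate fence_len '`')

-- ===== PORT B =====
-- Source B's while loop: keep incrementing n while "`"*n is a substring of text.
-- Python's 's in text' substring test is ported as the library infix test on char lists (exact).
def fenceLoop (t : List Char) (n : Nat) : Nat :=
  if h : (List.replicate n '`') <:+: t then fenceLoop t (n + 1) else n
termination_by t.length + 1 - n
decreasing_by
  have := h.length_le
  simp at this
  omega

def select_code_fence_alt (text : String) : String :=
  let n := fenceLoop text.toList 3
  String.ofList (List.replicate n '`')

-- ===== PRECONDITION & SPEC =====
def Spec_select_code_fence (text : String) (out : String) : Prop := out = select_code_fence_alt text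
instance (text : String) (out : String) : Decidable (Spec_select_code_fence text out) := by unfold Spec_select_code_fence; infer_instance

-- ===== CLAIM =====
def Claim_equal_select_code_fence : Prop := ∀ (text : String), Dom_select_code_fence text → Spec_select_code_fence text (select_code_fence text)

-- ===== LEMMAS AND PROOFS =====

-- Longest backtick run of l, given a pending current-run length c (characterises A's fold).
def hRun : Nat → List Char → Nat
  | _, [] => 0
  | c, x :: t => if x = '`' then max (c + 1) (hRun (c + 1) t) else hRun 0 t

theorem foldlA_eq_hRun (l : List Char) : ∀ L c,
    (l.foldl (fun (p : Nat × Nat) ch =>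
      if ch = '`' then
        let current := p.2 + 1
        let longest := if current > p.1 then current else p.1
        (longest, current)
      else (p.1, 0)) (L, c)).1 = max L (hRun c l) := by
  induction l with
  | nil => intro L c; simp [hRun]
  | cons x t ih =>
    intro L c
    by_cases hx : x = '`'
    · simp only [List.foldl_cons, hx, hRun, if_pos, ih]
      split_ifs <;> omega
    · simp only [List.foldl_cons, hRun, if_neg hx, ih]

theorem rep_cons_eq (c : Nat) (t : List Char) :
    List.replicate c '`' ++ '`' :: t = List.replicate (c + 1) '`' ++ t := by
  rw [List.replicate_succ']
  simp

theorem rep_infix (n m : Nat) (rest : List Char) (h : n ≤ m) :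
    List.replicate n '`' <:+: List.replicate m '`' ++ rest := by
  apply List.infix_append_of_infix_left
  rw [List.infix_replicate_iff]
  simp [h]

theorem pref_bound : ∀ (n c : Nat) (x : Char) (t : List Char), x ≠ '`' →
    List.replicate n '`' <+: List.replicate c '`' ++ x :: t → n ≤ c := by
  intro n
  induction n with
  | zero => intro c x t _ _; omega
  | succ m ih =>
    intro c x t hx hp
    rw [List.replicate_succ] at hp
    cases c with
    | zero =>
      simp only [List.replicate, List.nil_append] at hp
      rw [List.cons_prefix_cons] at hp
      exact absurd hp.1.symm hx
    | succ c' =>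
      rw [List.replicate_succ, List.cons_append, List.cons_prefix_cons] at hp
      have := ih c' x t hx hp.2
      omega

theorem infix_boundary : ∀ (c n : Nat) (x : Char) (t : List Char), x ≠ '`' →
    (List.replicate n '`' <:+: List.replicate c '`' ++ x :: t ↔
      n ≤ c ∨ List.replicate n '`' <:+: t) := by
  intro c
  induction c with
  | zero =>
    intro n x t hx
    simp only [List.replicate, List.nil_append]
    rw [List.infix_cons_iff]
    constructor
    · rintro (hp | hi)
      · left; exact pref_bound n 0 x t hx hp
      · right; exact hi
    · rintro (hn | hi)
      · interval_cases n
        exact Or.inl (List.nil_prefix)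
      · exact Or.inr hi
  | succ c' ih =>
    intro n x t hx
    rw [List.replicate_succ, List.cons_append, List.infix_cons_iff]
    constructor
    · rintro (hp | hi)
      · left
        have h2 : List.replicate n '`' <+: List.replicate (c' + 1) '`' ++ x :: t := by
          rw [List.replicate_succ, List.cons_append]; exact hp
        exact pref_bound n (c' + 1) x t hx h2
      · rcases (ih n x t hx).1 hi with h | h
        · exact Or.inl (by omega)
        · exact Or.inr h
    · rintro (hn | hi)
      · have := rep_infix n (c' + 1) (x :: t) hn
        rw [List.replicate_succ, List.cons_append] at this
        rcases List.infix_cons_iff.1 this with h | h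
        · exact Or.inl h
        · exact Or.inr h
      · exact Or.inr ((ih n x t hx).2 (Or.inr hi))

theorem infix_iff_hRun : ∀ (l : List Char) (c n : Nat),
    (List.replicate n '`' <:+: List.replicate c '`' ++ l ↔ n ≤ max c (hRun c l)) := by
  intro l
  induction l with
  | nil =>
    intro c n
    simp only [List.append_nil, hRun, Nat.max_zero]
    rw [List.infix_replicate_iff]
    simp
  | cons x t ih =>
    intro c n
    by_cases hx : x = '`'
    · subst hx
      rw [rep_cons_eq, ih (c + 1) n]
      simp [hRun]
    · rw [infix_boundary c n x t hx]
      have h0 := ih 0 n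
      simp only [List.replicate, List.nil_append] at h0
      rw [h0]
      simp only [hRun, if_neg hx]
      omega

theorem infix_iff_hRun0 (l : List Char) (n : Nat) :
    (List.replicate n '`' <:+: l ↔ n ≤ hRun 0 l) := by
  have := infix_iff_hRun l 0 n
  simpa using this

theorem fenceLoop_eq (t : List Char) : ∀ n, fenceLoop t n = max n (hRun 0 t + 1) := by
  intro n
  induction n using fenceLoop.induct t with
  | case1 n h ih =>
    rw [fenceLoop, dif_pos h, ih]
    have := (infix_iff_hRun0 t n).1 h
    omega
  | case2 n h =>
    rw [fenceLoop, dif_neg h]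
    have : ¬ n ≤ hRun 0 t := fun hle => h ((infix_iff_hRun0 t n).2 hle)
    omega

-- ===== VERDICT =====
theorem select_code_fence_spec : Claim_equal_select_code_fence := by
  intro text _
  unfold Spec_select_code_fence select_code_fence select_code_fence_alt
  simp only [foldlA_eq_hRun, fenceLoop_eq, Nat.zero_max]
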